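-- pv_equiv track=rewrite | github.com/ayazkhan27/cyclic | torusversionasymmetric.py | minimal_movement
-- ===== SOURCE A (Python) =====
-- def minimal_movement(start_sequence, target_sequence, digit_positions, sequence_length, z_value_length):
--     start_positions = digit_positions[start_sequence]
--     target_positions = digit_positions[target_sequence]
--
--     min_movements = []
--     min_movement_value = sequence_length
--
--     for start_pos in start_positions:
--         for target_pos in target_positions:
--             # Extract X, Y, and Z values
--             start_x, start_z = start_pos[0], start_pos[1]
--             target_x, target_z = target_pos[0], target_pos[1]
--
--             # Handle X-movement (clockwise/anticlockwise)
--             clockwise_movement_x = (target_x - start_x) % sequence_length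
--             anticlockwise_movement_x = (start_x - target_x) % sequence_length
--
--             # Handle Z-movement (layer wrapping)
--             movement_z = abs(target_z - start_z) % z_value_length  # Movement in the Z-dimension
--
--             # Combine the movements across both dimensions
--             total_movement = clockwise_movement_x + movement_z
--
--             if total_movement < min_movement_value:
--                 min_movements = [total_movement]
--                 min_movement_value = total_movement
--             elif total_movement == min_movement_value:
--                 min_movements.append(total_movement)
--
--     return min_movements
-- ===== SOURCE B (Python) =====
-- def minimal_movement(start_sequence, target_sequence, digit_positions, sequence_length, z_value_length):
--     costs = [
--         (target_x - start_x) % sequence_length + abs(target_z - start_z) % z_value_length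
--         for (start_x, start_z) in digit_positions[start_sequence]
--         for (target_x, target_z) in digit_positions[target_sequence]
--     ]
--     best = min([sequence_length] + costs)
--     return [c for c in costs if c == best]
-- ===== Notes on version B (the rewrite author's own statement) =====
-- stated objective: simpler
-- what changed: Replaces A's single-pass running-min loop with reset/append branches by building the full per-pair cost list with a comprehension, taking min([sequence_length]+costs), and filtering the costs equal to it.
import Mathlib
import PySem

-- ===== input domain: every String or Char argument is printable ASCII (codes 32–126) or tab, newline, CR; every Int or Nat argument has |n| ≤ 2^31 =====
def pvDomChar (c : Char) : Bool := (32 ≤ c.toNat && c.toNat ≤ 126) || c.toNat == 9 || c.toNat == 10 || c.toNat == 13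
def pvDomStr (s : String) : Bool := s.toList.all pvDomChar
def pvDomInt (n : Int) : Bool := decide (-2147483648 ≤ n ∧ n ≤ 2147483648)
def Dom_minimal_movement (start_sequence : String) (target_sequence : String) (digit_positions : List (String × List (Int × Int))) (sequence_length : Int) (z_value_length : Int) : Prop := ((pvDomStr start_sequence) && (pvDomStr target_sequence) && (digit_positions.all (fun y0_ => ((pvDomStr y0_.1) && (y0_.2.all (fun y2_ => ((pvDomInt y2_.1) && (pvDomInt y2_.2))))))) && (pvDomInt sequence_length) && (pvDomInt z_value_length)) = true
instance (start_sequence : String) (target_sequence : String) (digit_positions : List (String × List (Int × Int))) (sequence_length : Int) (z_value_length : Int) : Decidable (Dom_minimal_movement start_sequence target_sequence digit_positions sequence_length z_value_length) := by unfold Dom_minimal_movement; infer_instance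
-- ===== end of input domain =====

-- B replaces A's running-min tracking loop (reset/append branches) by building the full per-pair
-- cost list once, taking min([sequence_length] + costs), and filtering the costs equal to it (simpler decomposition).

-- ===== PORT A =====
def minimal_movement (start_sequence : String) (target_sequence : String) (digit_positions : List (String × List (Int × Int))) (sequence_length : Int) (z_value_length : Int) : List Int :=
  match (digit_positions.find? (fun p => p.1 == start_sequence)).map Prod.snd,
        (digit_positions.find? (fun p => p.1 == target_sequence)).map Prod.snd with
  | some start_positions, some target_positions =>
    (start_positions.foldl (fun acc start_pos =>
      target_positions.foldl (fun acc target_pos =>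
        let clockwise_movement_x := PySem.Int.mod (target_pos.1 - start_pos.1) sequence_length
        let _anticlockwise_movement_x := PySem.Int.mod (start_pos.1 - target_pos.1) sequence_length
        let movement_z := PySem.Int.mod |target_pos.2 - start_pos.2| z_value_length
        let total_movement := clockwise_movement_x + movement_z
        if total_movement < acc.2 then ([total_movement], total_movement)
        else if total_movement = acc.2 then (acc.1 ++ [total_movement], acc.2)
        else acc) acc) (([] : List Int), sequence_length)).1
  | _, _ => []  -- Python raises KeyError here; excluded by Pre_

-- ===== PORT B =====
def minimal_movement_alt (start_sequence : String) (target_sequence : String) (digit_positions : List (String × List (Int × Int))) (sequence_length : Int) (z_value_length : Int) : List Int :=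
  match (digit_positions.find? (fun p => p.1 == start_sequence)).map Prod.snd with
  | none => []  -- Python raises KeyError here; excluded by Pre_
  | some start_positions =>
  match (digit_positions.find? (fun p => p.1 == target_sequence)).map Prod.snd with
  | none => []  -- Python raises KeyError here; excluded by Pre_
  | some target_positions =>
    let costs := start_positions.flatMap (fun s =>
      target_positions.map (fun t =>
        PySem.Int.mod (t.1 - s.1) sequence_length + PySem.Int.mod |t.2 - s.2| z_value_length))
    let best := (PySem.List.min? (sequence_length :: costs) (fun x => x)).getD sequence_length
    costs.filter (fun c => c == best)

-- ===== PRECONDITION & SPEC =====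
-- Pre_ excludes exactly the inputs where Python A raises: a KeyError when either sequence is
-- missing from digit_positions, or a ZeroDivisionError when sequence_length or z_value_length is 0.
def Pre_minimal_movement (start_sequence : String) (target_sequence : String) (digit_positions : List (String × List (Int × Int))) (sequence_length : Int) (z_value_length : Int) : Prop :=
  (digit_positions.any (fun p => p.1 == start_sequence)) = true ∧
  (digit_positions.any (fun p => p.1 == target_sequence)) = true ∧
  sequence_length ≠ 0 ∧ z_value_length ≠ 0
instance (start_sequence : String) (target_sequence : String) (digit_positions : List (String × List (Int × Int))) (sequence_length : Int) (z_value_length : Int) : Decidable (Pre_minimal_movement start_sequence target_sequence digit_positions sequence_length z_value_length) := by unfold Pre_minimal_movement; infer_instance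

def pvWitness_minimal_movement : String × String × (List (String × List (Int × Int))) × Int × Int :=
  ("a", "b", [("a", [(0, 0), (1, 2)]), ("b", [(2, 1)])], 5, 3)

def Spec_minimal_movement (start_sequence : String) (target_sequence : String) (digit_positions : List (String × List (Int × Int))) (sequence_length : Int) (z_value_length : Int) (out : List Int) : Prop := out = minimal_movement_alt start_sequence target_sequence digit_positions sequence_length z_value_length
instance (start_sequence : String) (target_sequence : String) (digit_positions : List (String × List (Int × Int))) (sequence_length : Int) (z_value_length : Int) (out : List Int) : Decidable (Spec_minimal_movement start_sequence target_sequence digit_positions sequence_length z_value_length out) := by unfold Spec_minimal_movement; infer_instance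

-- ===== CLAIM (what is proved, stated in full; the proofs are below) =====
def Claim_equal_minimal_movement : Prop := ∀ (start_sequence : String) (target_sequence : String) (digit_positions : List (String × List (Int × Int))) (sequence_length : Int) (z_value_length : Int), Dom_minimal_movement start_sequence target_sequence digit_positions sequence_length z_value_length → Pre_minimal_movement start_sequence target_sequence digit_positions sequence_length z_value_length → Spec_minimal_movement start_sequence target_sequence digit_positions sequence_length z_value_length (minimal_movement start_sequence target_sequence digit_positions sequence_length z_value_length)

-- ===== LEMMAS AND PROOFS =====

-- A's loop body, on an already-computed cost
def pvStep (acc : List Int × Int) (c : Int) : List Int × Int :=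
  if c < acc.2 then ([c], c) else if c = acc.2 then (acc.1 ++ [c], acc.2) else acc

-- the per-pair cost
def pvCost (sl zl : Int) (s t : Int × Int) : Int :=
  PySem.Int.mod (t.1 - s.1) sl + PySem.Int.mod |t.2 - s.2| zl

lemma pv_foldl_min_le (cs : List Int) (v : Int) : cs.foldl min v ≤ v := by
  induction cs generalizing v with
  | nil => simp
  | cons c cs ih => exact le_trans (ih (min v c)) (min_le_left _ _)

lemma pv_fold_pvStep (cs : List Int) (lst : List Int) (v : Int) :
    cs.foldl pvStep (lst, v) =
      ((if cs.foldl min v < v then [] else lst) ++ cs.filter (fun c => c == cs.foldl min v),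
        cs.foldl min v) := by
  induction cs generalizing lst v with
  | nil => simp
  | cons c cs ih =>
    simp only [List.foldl_cons, List.filter_cons]
    by_cases h1 : c < v
    · have hm : min v c = c := by omega
      simp only [hm]
      rw [show pvStep (lst, v) c = ([c], c) by simp [pvStep, h1], ih]
      have hle : cs.foldl min c ≤ c := pv_foldl_min_le cs c
      have hlt : cs.foldl min c < v := by omega
      by_cases h2 : cs.foldl min c = c
      · simp [h2, h1]
      · have : cs.foldl min c < c := by omega
        simp [this, hlt, Ne.symm h2]
    · by_cases h2 : c = v
      · have hm : min v c = v := by omega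
        simp only [hm]
        rw [show pvStep (lst, v) c = (lst ++ [c], v) by simp [pvStep, h2], ih]
        have hle : cs.foldl min v ≤ v := pv_foldl_min_le cs v
        by_cases h3 : cs.foldl min v < v
        · have : ¬ (c = cs.foldl min v) := by omega
          simp [h3, this]
        · have hv : cs.foldl min v = v := by omega
          simp [hv, h2]
      · have h3 : v < c := by omega
        have hm : min v c = v := by omega
        simp only [hm]
        rw [show pvStep (lst, v) c = (lst, v) by simp [pvStep, h1, h2], ih]
        have hle : cs.foldl min v ≤ v := pv_foldl_min_le cs v
        have : ¬ (c = cs.foldl min v) := by omega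
        simp [this]

lemma pv_foldl_flatMap {α : Type} (g : α → List Int) (l : List α) (init : List Int × Int) :
    (l.flatMap g).foldl pvStep init = l.foldl (fun acc x => (g x).foldl pvStep acc) init := by
  induction l generalizing init with
  | nil => rfl
  | cons x l ih => simp [List.flatMap_cons, List.foldl_append, ih]

lemma pv_inner_eq (sl zl : Int) (s : Int × Int) (tp : List (Int × Int)) (acc : List Int × Int) :
    tp.foldl (fun acc target_pos =>
        let clockwise_movement_x := PySem.Int.mod (target_pos.1 - s.1) sl
        let _anticlockwise_movement_x := PySem.Int.mod (s.1 - target_pos.1) sl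
        let movement_z := PySem.Int.mod |target_pos.2 - s.2| zl
        let total_movement := clockwise_movement_x + movement_z
        if total_movement < acc.2 then ([total_movement], total_movement)
        else if total_movement = acc.2 then (acc.1 ++ [total_movement], acc.2)
        else acc) acc
      = (tp.map (pvCost sl zl s)).foldl pvStep acc := by
  rw [List.foldl_map]
  rfl

theorem pv_main (start_sequence target_sequence : String)
    (digit_positions : List (String × List (Int × Int))) (sl zl : Int) :
    minimal_movement start_sequence target_sequence digit_positions sl zl
      = minimal_movement_alt start_sequence target_sequence digit_positions sl zl := by
  unfold minimal_movement minimal_movement_alt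
  cases hs : (digit_positions.find? (fun p => p.1 == start_sequence)).map Prod.snd with
  | none => rfl
  | some sp =>
    cases ht : (digit_positions.find? (fun p => p.1 == target_sequence)).map Prod.snd with
    | none => rfl
    | some tp =>
      simp only
      have hcosts : (sp.flatMap (fun s => tp.map (fun t =>
          PySem.Int.mod (t.1 - s.1) sl + PySem.Int.mod |t.2 - s.2| zl)))
          = sp.flatMap (fun s => tp.map (pvCost sl zl s)) := rfl
      rw [hcosts]
      set costs := sp.flatMap (fun s => tp.map (pvCost sl zl s)) with hc
      have hA : sp.foldl (fun acc start_pos =>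
          tp.foldl (fun acc target_pos =>
            let clockwise_movement_x := PySem.Int.mod (target_pos.1 - start_pos.1) sl
            let _anticlockwise_movement_x := PySem.Int.mod (start_pos.1 - target_pos.1) sl
            let movement_z := PySem.Int.mod |target_pos.2 - start_pos.2| zl
            let total_movement := clockwise_movement_x + movement_z
            if total_movement < acc.2 then ([total_movement], total_movement)
            else if total_movement = acc.2 then (acc.1 ++ [total_movement], acc.2)
            else acc) acc) (([] : List Int), sl)
          = costs.foldl pvStep (([] : List Int), sl) := by
        rw [pv_foldl_flatMap]
        have hfun : (fun (acc : List Int × Int) (start_pos : Int × Int) =>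
            tp.foldl (fun acc target_pos =>
              let clockwise_movement_x := PySem.Int.mod (target_pos.1 - start_pos.1) sl
              let _anticlockwise_movement_x := PySem.Int.mod (start_pos.1 - target_pos.1) sl
              let movement_z := PySem.Int.mod |target_pos.2 - start_pos.2| zl
              let total_movement := clockwise_movement_x + movement_z
              if total_movement < acc.2 then ([total_movement], total_movement)
              else if total_movement = acc.2 then (acc.1 ++ [total_movement], acc.2)
              else acc) acc)
            = (fun acc s => (tp.map (pvCost sl zl s)).foldl pvStep acc) :=
          funext fun acc => funext fun s => pv_inner_eq sl zl s tp acc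
        rw [hfun]
      rw [hA, pv_fold_pvStep, PySem.List.min?_id_cons]
      simp
theorem minimal_movement_spec : Claim_equal_minimal_movement := by
  intro s t dp sl zl _ _
  unfold Spec_minimal_movement
  exact pv_main s t dp sl zl
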